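-- pv_equiv track=rewrite | github.com/panguojun/AI | 能量图景_2D.py | path_to_2d_coords
-- ===== SOURCE A (Python) =====
-- def path_to_2d_coords(path):
--     """将路径字符串转换为2D坐标序列"""
--     coords = [(0, 0)]  # 起始点
--     x, y = 0, 0
--
--     for direction in path:
--         if direction == 'U':    # 上
--             y += 1
--         elif direction == 'D':  # 下
--             y -= 1
--         elif direction == 'L':  # 左
--             x -= 1
--         elif direction == 'R':  # 右
--             x += 1
--
--         coords.append((x, y))
--
--     return coords
-- ===== SOURCE B (Python) =====
-- DELTAS = {'U': (0, 1), 'D': (0, -1), 'L': (-1, 0), 'R': (1, 0)}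
--
-- def path_to_2d_coords(path):
--     """Map each step to a delta vector, then build the path as per-axis prefix sums zipped together."""
--     deltas = [DELTAS.get(c, (0, 0)) for c in path]
--     xs = [0]
--     ys = [0]
--     for dx, dy in deltas:
--         xs.append(xs[-1] + dx)
--         ys.append(ys[-1] + dy)
--     return list(zip(xs, ys))
-- ===== Notes on version B (the rewrite author's own statement) =====
-- stated objective: alternative
-- what changed: Replaced the if/elif chain mutating (x, y) inside one emitting loop by a map-then-scan decomposition: a delta table turns the string into delta vectors, per-axis prefix sums are accumulated, and the coordinate list is their zip.
import Mathlib
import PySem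

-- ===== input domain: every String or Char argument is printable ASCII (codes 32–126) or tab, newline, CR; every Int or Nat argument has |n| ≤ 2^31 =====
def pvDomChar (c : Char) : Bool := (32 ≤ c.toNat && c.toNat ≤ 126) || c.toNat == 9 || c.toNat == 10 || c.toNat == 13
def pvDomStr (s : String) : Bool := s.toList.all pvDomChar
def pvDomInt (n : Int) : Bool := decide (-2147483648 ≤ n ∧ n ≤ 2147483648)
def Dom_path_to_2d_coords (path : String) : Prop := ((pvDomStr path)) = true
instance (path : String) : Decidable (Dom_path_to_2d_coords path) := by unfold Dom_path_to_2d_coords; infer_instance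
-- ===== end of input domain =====

-- B replaces A's single mutating if/elif loop by a map-to-deltas step followed by per-axis
-- prefix sums that are zipped together (alternative decomposition, same cost).

-- ===== PORT A =====
-- state: (coords, x, y); each character updates (x, y) via the if/elif chain and appends (x, y)
def path_to_2d_coords (path : String) : List (Int × Int) :=
  (path.toList.foldl
    (fun (st : List (Int × Int) × Int × Int) (direction : Char) =>
      let coords := st.1
      let x := st.2.1
      let y := st.2.2
      let xy : Int × Int :=
        if direction = 'U' then (x, y + 1)
        else if direction = 'D' then (x, y - 1)
        else if direction = 'L' then (x - 1, y)
        else if direction = 'R' then (x + 1, y)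
        else (x, y)
      (coords ++ [xy], xy))
    ([(0, 0)], 0, 0)).1

-- ===== PORT B =====
-- module-level DELTAS dict
def pvDELTAS : PySem.Dict Char (Int × Int) :=
  ⟨[('U', (0, 1)), ('D', (0, -1)), ('L', (-1, 0)), ('R', (1, 0))]⟩

def path_to_2d_coords_alt (path : String) : List (Int × Int) :=
  let deltas := path.toList.map (fun c => PySem.Dict.getD pvDELTAS c (0, 0))
  let xs := deltas.foldl (fun (xs : List Int) d => xs ++ [xs.getLastD 0 + d.1]) [0]
  let ys := deltas.foldl (fun (ys : List Int) d => ys ++ [ys.getLastD 0 + d.2]) [0]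
  List.zip xs ys

-- ===== PRECONDITION & SPEC =====
def Spec_path_to_2d_coords (path : String) (out : List (Int × Int)) : Prop := out = path_to_2d_coords_alt path
instance (path : String) (out : List (Int × Int)) : Decidable (Spec_path_to_2d_coords path out) := by unfold Spec_path_to_2d_coords; infer_instance

-- ===== CLAIM (what is proved, stated in full; the proofs are below) =====
def Claim_equal_path_to_2d_coords : Prop := ∀ (path : String), Dom_path_to_2d_coords path → Spec_path_to_2d_coords path (path_to_2d_coords path)

-- ===== LEMMAS AND PROOFS =====

-- reference scans used only by the proof
def pvScanX (ds : List (Int × Int)) (x : Int) : List Int :=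
  match ds with
  | [] => []
  | d :: t => (x + d.1) :: pvScanX t (x + d.1)

def pvScanY (ds : List (Int × Int)) (y : Int) : List Int :=
  match ds with
  | [] => []
  | d :: t => (y + d.2) :: pvScanY t (y + d.2)

def pvScan (ds : List (Int × Int)) (x y : Int) : List (Int × Int) :=
  match ds with
  | [] => []
  | d :: t => (x + d.1, y + d.2) :: pvScan t (x + d.1) (y + d.2)

-- A's per-character step produces exactly (x + dx, y + dy) for the DELTAS entry
lemma pvStep_eq (x y : Int) (c : Char) :
    (if c = 'U' then (x, y + 1)
     else if c = 'D' then (x, y - 1)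
     else if c = 'L' then (x - 1, y)
     else if c = 'R' then (x + 1, y)
     else (x, y))
    = (x + (PySem.Dict.getD pvDELTAS c (0, 0)).1, y + (PySem.Dict.getD pvDELTAS c (0, 0)).2) := by
  by_cases h1 : c = 'U'
  · subst h1; simp [pvDELTAS, PySem.Dict.getD, PySem.Dict.get?]
  by_cases h2 : c = 'D'
  · subst h2; simp [pvDELTAS, PySem.Dict.getD, PySem.Dict.get?, h1]; omega
  by_cases h3 : c = 'L'
  · subst h3; simp [pvDELTAS, PySem.Dict.getD, PySem.Dict.get?, h1, h2]; omega
  by_cases h4 : c = 'R'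
  · subst h4; simp [pvDELTAS, PySem.Dict.getD, PySem.Dict.get?, h1, h2, h3]
  simp [h1, h2, h3, h4, pvDELTAS, PySem.Dict.getD, PySem.Dict.get?,
    Ne.symm h1, Ne.symm h2, Ne.symm h3, Ne.symm h4]

-- A's fold from an arbitrary state appends the scan
lemma pvFoldA (l : List Char) (coords : List (Int × Int)) (x y : Int) :
    (l.foldl
      (fun (st : List (Int × Int) × Int × Int) (direction : Char) =>
        let coords := st.1
        let x := st.2.1
        let y := st.2.2
        let xy : Int × Int :=
          if direction = 'U' then (x, y + 1)
          else if direction = 'D' then (x, y - 1)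
          else if direction = 'L' then (x - 1, y)
          else if direction = 'R' then (x + 1, y)
          else (x, y)
        (coords ++ [xy], xy))
      (coords, x, y)).1
    = coords ++ pvScan (l.map (fun c => PySem.Dict.getD pvDELTAS c (0, 0))) x y := by
  induction l generalizing coords x y with
  | nil => simp [pvScan]
  | cons c t ih =>
      simp only [List.foldl_cons, List.map_cons, pvScan]
      rw [pvStep_eq x y c]
      rw [ih]
      simp

-- B's xs fold from a nonempty prefix appends pvScanX
lemma pvFoldX (ds : List (Int × Int)) (xs : List Int) (h : xs ≠ []) :
    ds.foldl (fun (xs : List Int) d => xs ++ [xs.getLastD 0 + d.1]) xs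
    = xs ++ pvScanX ds (xs.getLastD 0) := by
  induction ds generalizing xs with
  | nil => simp [pvScanX]
  | cons d t ih =>
      simp only [List.foldl_cons, pvScanX]
      rw [ih (xs ++ [xs.getLastD 0 + d.1]) (by simp)]
      simp

lemma pvFoldY (ds : List (Int × Int)) (ys : List Int) (h : ys ≠ []) :
    ds.foldl (fun (ys : List Int) d => ys ++ [ys.getLastD 0 + d.2]) ys
    = ys ++ pvScanY ds (ys.getLastD 0) := by
  induction ds generalizing ys with
  | nil => simp [pvScanY]
  | cons d t ih =>
      simp only [List.foldl_cons, pvScanY]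
      rw [ih (ys ++ [ys.getLastD 0 + d.2]) (by simp)]
      simp

-- zipping the two per-axis scans gives the pair scan
lemma pvZipScan (ds : List (Int × Int)) (x y : Int) :
    List.zip (pvScanX ds x) (pvScanY ds y) = pvScan ds x y := by
  induction ds generalizing x y with
  | nil => simp [pvScanX, pvScanY, pvScan]
  | cons d t ih =>
      simp only [pvScanX, pvScanY, pvScan, List.zip_cons_cons]
      exact congrArg _ (ih _ _)

-- ===== VERDICT (by name: the statement is the Claim_ definition above) =====
theorem path_to_2d_coords_spec : Claim_equal_path_to_2d_coords := by
  intro path _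
  unfold Spec_path_to_2d_coords path_to_2d_coords path_to_2d_coords_alt
  dsimp only
  rw [pvFoldA, pvFoldX _ [0] (by simp), pvFoldY _ [0] (by simp)]
  simp [List.getLastD, pvZipScan]
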